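-- pv_equiv track=rewrite | github.com/Coltor-L/advent_of_code | day3/day3.py | get_gamma_rate
-- ===== SOURCE A (Python) =====
-- def get_gamma_rate(binary_numbers: list[list[int]]) -> int:
--     if len(binary_numbers) == 0:
--         return 0
--
--     ret_repr = []
--
--     for j in range(0, len(binary_numbers[0])):
--         one_count = 0
--         zero_count = 0
--         for i in range(0, len(binary_numbers)):
--             if binary_numbers[i][j] == 0:
--                 zero_count += 1
--             else:
--                 one_count += 1
--
--         if one_count > zero_count:
--             ret_repr.append(1)
--         else:
--             ret_repr.append(0)
--
--     ret = 0
--     power = 0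
--
--     for i in range(0, len(ret_repr)):
--         ret += (2 ** power) * ret_repr[len(ret_repr) - 1 - i]
--         power += 1
--
--     return ret
-- ===== SOURCE B (Python) =====
-- def get_gamma_rate(binary_numbers: list[list[int]]) -> int:
--     if not binary_numbers:
--         return 0
--     counts = [0] * len(binary_numbers[0])
--     for row in binary_numbers:
--         counts = [c + (1 if b != 0 else 0) for c, b in zip(counts, row)]
--     ret = 0
--     for c in counts:
--         ret = 2 * ret + (1 if 2 * c > len(binary_numbers) else 0)
--     return ret
-- ===== Notes on version B (the rewrite author's own statement) =====
-- stated objective: alternative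
-- what changed: Replaces A's column-major nested index scans (inner loop re-reading all rows for every column, intermediate bit list, separate back-to-front 2**power loop) by a row-major single pass: each row is consumed once, zipped into a running per-column ones-count vector, and the final answer is folded directly from the count vector with Horner's rule -- no element indexing at all.
import Mathlib
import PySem

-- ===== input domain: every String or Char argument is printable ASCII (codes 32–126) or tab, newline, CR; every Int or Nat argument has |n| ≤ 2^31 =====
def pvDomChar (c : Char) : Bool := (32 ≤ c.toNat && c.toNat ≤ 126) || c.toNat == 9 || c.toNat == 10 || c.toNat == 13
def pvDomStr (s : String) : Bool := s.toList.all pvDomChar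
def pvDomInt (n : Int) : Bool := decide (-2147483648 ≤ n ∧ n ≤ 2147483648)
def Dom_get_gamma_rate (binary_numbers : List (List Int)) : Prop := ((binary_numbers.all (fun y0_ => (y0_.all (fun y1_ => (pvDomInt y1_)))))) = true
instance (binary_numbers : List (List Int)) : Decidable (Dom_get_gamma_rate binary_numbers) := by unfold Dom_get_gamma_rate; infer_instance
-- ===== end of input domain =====

-- B replaces A's column-major nested index scans and two-stage bit-list/2**power conversion by a
-- row-major single pass: each row is zipped into a running per-column ones-count vector, and the
-- answer is folded from that vector with Horner's rule; empty input still gives 0, ties still give bit 0.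

-- ===== PORT A =====
def get_gamma_rate (binary_numbers : List (List Int)) : Int :=
  if binary_numbers.length = 0 then 0
  else
    -- for j in range(0, len(binary_numbers[0])): count zeros/ones down column j, append majority bit
    let ret_repr : List Int :=
      (PySem.List.pyRange 0 ((PySem.List.pyGetD binary_numbers 0 []).length : Int) 1).foldl
        (fun acc j =>
          let counts : Int × Int :=  -- (one_count, zero_count)
            (PySem.List.pyRange 0 (binary_numbers.length : Int) 1).foldl
              (fun (p : Int × Int) i =>
                if PySem.List.pyGetD (PySem.List.pyGetD binary_numbers i []) j 0 = 0
                then (p.1, p.2 + 1) else (p.1 + 1, p.2))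
              (0, 0)
          if counts.1 > counts.2 then acc ++ [1] else acc ++ [0]) []
    -- for i in range(0, len(ret_repr)): ret += 2**power * ret_repr[len-1-i]; power += 1
    ((PySem.List.pyRange 0 (ret_repr.length : Int) 1).foldl
      (fun (p : Int × Nat) i =>
        (p.1 + 2 ^ p.2 * PySem.List.pyGetD ret_repr ((ret_repr.length : Int) - 1 - i) 0, p.2 + 1))
      (0, 0)).1

-- ===== PORT B =====
def get_gamma_rate_alt (binary_numbers : List (List Int)) : Int :=
  if binary_numbers.length = 0 then 0
  else
    -- counts = [0]*len(binary_numbers[0]); for row in bn: counts = [c + (1 if b else 0) for c,b in zip(counts,row)]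
    let counts : List Int :=
      binary_numbers.foldl
        (fun counts row =>
          (counts.zip row).map (fun p => p.1 + if p.2 ≠ 0 then 1 else 0))
        (List.replicate (PySem.List.pyGetD binary_numbers 0 []).length 0)
    -- for c in counts: ret = 2*ret + (1 if 2*c > len(bn) else 0)
    counts.foldl
      (fun ret c => 2 * ret + if 2 * c > (binary_numbers.length : Int) then 1 else 0) 0

-- ===== PRECONDITION & SPEC =====
-- Pre_ excludes exactly the ragged matrices on which Python A raises IndexError:
-- a row shorter than the first row is indexed at a column it does not have.
def Pre_get_gamma_rate (binary_numbers : List (List Int)) : Prop :=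
  ∀ row ∈ binary_numbers, (binary_numbers.headD []).length ≤ row.length
instance (binary_numbers : List (List Int)) : Decidable (Pre_get_gamma_rate binary_numbers) := by
  unfold Pre_get_gamma_rate; infer_instance

def pvWitness_get_gamma_rate : List (List Int) := [[1, 0, 1], [1, 1, 0], [0, 1, 1]]

def Spec_get_gamma_rate (binary_numbers : List (List Int)) (out : Int) : Prop := out = get_gamma_rate_alt binary_numbers
instance (binary_numbers : List (List Int)) (out : Int) : Decidable (Spec_get_gamma_rate binary_numbers out) := by unfold Spec_get_gamma_rate; infer_instance

-- ===== CLAIM (what is proved, stated in full; the proofs are below) =====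
def Claim_equal_get_gamma_rate : Prop := ∀ (binary_numbers : List (List Int)), Dom_get_gamma_rate binary_numbers → Pre_get_gamma_rate binary_numbers → Spec_get_gamma_rate binary_numbers (get_gamma_rate binary_numbers)

-- ===== LEMMAS AND PROOFS =====

-- per-column ones count (Int column index, Python-style read)
def pvOnes (bn : List (List Int)) (j : Int) : Int :=
  bn.foldl (fun s row => if PySem.List.pyGetD row j 0 ≠ 0 then s + 1 else s) 0

-- per-column majority bit
def pvBit (bn : List (List Int)) (j : Int) : Int :=
  if 2 * pvOnes bn j > (bn.length : Int) then 1 else 0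

-- little-endian value of a bit list
def pvLend : List Int → Int
  | [] => 0
  | b :: t => b + 2 * pvLend t

lemma pvOnes_countP (bn : List (List Int)) (j : Int) :
    pvOnes bn j = (bn.countP (fun row => decide (PySem.List.pyGetD row j 0 ≠ 0)) : Int) := by
  unfold pvOnes
  have := PySem.List.foldl_count_if (fun row => decide (PySem.List.pyGetD row j 0 ≠ 0)) bn 0
  simpa using this

-- A's counting pair fold, characterised.
lemma countPair_eq (j : Int) (bn : List (List Int)) (a b : Int) :
    bn.foldl (fun (p : Int × Int) row =>
        if PySem.List.pyGetD row j 0 = 0 then (p.1, p.2 + 1) else (p.1 + 1, p.2)) (a, b)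
      = (a + pvOnes bn j, b + (bn.length : Int) - pvOnes bn j) := by
  induction bn generalizing a b with
  | nil => simp [pvOnes]
  | cons r t ih =>
    have hones : pvOnes (r :: t) j =
        (if PySem.List.pyGetD r j 0 ≠ 0 then (1:Int) else 0) + pvOnes t j := by
      simp only [pvOnes_countP, List.countP_cons]
      by_cases h : PySem.List.pyGetD r j 0 = 0
      · simp [h]
      · simp [h]; ring
    by_cases h : PySem.List.pyGetD r j 0 = 0
    · simp only [List.foldl_cons, if_pos h, ih]
      rw [hones]; simp [h, Prod.ext_iff]; omega
    · simp only [List.foldl_cons, if_neg h, ih]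
      rw [hones]; simp [h, Prod.ext_iff]; omega

-- the value of A's back-to-front conversion fold over a list it indexes reversed
lemma lendPair_eq (L : List Int) (a : Int) (p : Nat) :
    (L.foldl (fun (q : Int × Nat) b => (q.1 + 2 ^ q.2 * b, q.2 + 1)) (a, p)).1
      = a + 2 ^ p * pvLend L := by
  induction L generalizing a p with
  | nil => simp [pvLend]
  | cons b t ih =>
    simp only [List.foldl_cons, ih, pvLend]
    ring

lemma horner_eq_lend_reverse (L : List Int) (r : Int) :
    L.foldl (fun acc b => 2 * acc + b) r = r * 2 ^ L.length + pvLend L.reverse := by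
  induction L generalizing r with
  | nil => simp [pvLend]
  | cons b t ih =>
    simp only [List.foldl_cons, ih, List.reverse_cons]
    have : pvLend (t.reverse ++ [b]) = pvLend t.reverse + 2 ^ t.reverse.length * b := by
      clear ih
      induction t.reverse with
      | nil => simp [pvLend]
      | cons c m ih2 => simp [pvLend, ih2]; ring
    rw [this]
    simp [pow_succ]
    ring

-- A's conversion loop, as a function of the bit list it reads.
lemma finalLoop_eq_horner (M : List Int) :
    ((PySem.List.pyRange 0 (M.length : Int) 1).foldl
      (fun (p : Int × Nat) i =>
        (p.1 + 2 ^ p.2 * PySem.List.pyGetD M ((M.length : Int) - 1 - i) 0, p.2 + 1))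
      (0, 0)).1 = M.foldl (fun acc b => 2 * acc + b) 0 := by
  have hcongr :
      (PySem.List.pyRange 0 (M.length : Int) 1).foldl
        (fun (p : Int × Nat) i =>
          (p.1 + 2 ^ p.2 * PySem.List.pyGetD M ((M.length : Int) - 1 - i) 0, p.2 + 1)) (0, 0)
      = (PySem.List.pyRange 0 ((M.reverse.length : Int)) 1).foldl
        (fun (p : Int × Nat) i =>
          (p.1 + 2 ^ p.2 * PySem.List.pyGetD M.reverse i 0, p.2 + 1)) (0, 0) := by
    rw [List.length_reverse]
    apply PySem.List.foldl_congr_mem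
    intro acc i hi
    rw [PySem.List.mem_pyRange_one] at hi
    have h1 : PySem.List.pyGetD M ((M.length : Int) - 1 - i) 0 = M[((M.length : Int) - 1 - i).toNat] := by
      apply PySem.List.pyGetD_eq_getElem <;> omega
    have h2 : PySem.List.pyGetD M.reverse i 0 = M.reverse[i.toNat]'(by rw [List.length_reverse]; omega) := by
      apply PySem.List.pyGetD_eq_getElem
      · omega
      · simp only [List.length_reverse]; omega
    rw [h1, h2, List.getElem_reverse]
    have hidx : ((M.length : Int) - 1 - i).toNat = M.length - 1 - i.toNat := by omega
    simp only [hidx]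
  rw [hcongr, PySem.List.foldl_pyRange_zero_pyGetD' M.reverse 0
        (fun (p : Int × Nat) b => (p.1 + 2 ^ p.2 * b, p.2 + 1)) ((0 : Int), (0 : Nat)),
      lendPair_eq, horner_eq_lend_reverse]
  ring

-- one zip step of B, elementwise, when the row is long enough
lemma zip_step_eq (cs row : List Int) (h : cs.length ≤ row.length) :
    (cs.zip row).map (fun p => p.1 + if p.2 ≠ 0 then 1 else 0)
      = (List.range cs.length).map
          (fun k => cs.getD k 0 + if row.getD k 0 ≠ 0 then 1 else 0) := by
  apply List.ext_getElem
  · simp [Nat.min_eq_left h]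
  · intro k hk1 hk2
    simp only [List.length_map, List.length_zip, Nat.min_eq_left h] at hk1
    simp only [List.getElem_map, List.getElem_zip, List.getElem_range,
      List.getD_eq_getElem?_getD, List.getElem?_eq_getElem hk1,
      List.getElem?_eq_getElem (Nat.lt_of_lt_of_le hk1 h), Option.getD_some]

-- B's whole counting fold, characterised under Pre_-style row-length bounds
lemma zipfold_eq (bn : List (List Int)) :
    ∀ (cs : List Int), (∀ row ∈ bn, cs.length ≤ row.length) →
    bn.foldl (fun counts row =>
        (counts.zip row).map (fun p => p.1 + if p.2 ≠ 0 then 1 else 0)) cs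
      = (List.range cs.length).map (fun k => cs.getD k 0 + pvOnes bn (k : Int)) := by
  induction bn with
  | nil =>
    intro cs _
    simp only [List.foldl_nil, pvOnes, List.foldl_nil, add_zero]
    apply List.ext_getElem
    · simp
    · intro k hk1 hk2
      simp only [List.length_map, List.length_range] at hk2
      simp [List.getD_eq_getElem?_getD, List.getElem?_eq_getElem (by simpa using hk2)]
  | cons r t ih =>
    intro cs h
    have hr : cs.length ≤ r.length := h r (List.mem_cons_self)
    rw [List.foldl_cons, zip_step_eq cs r hr,
        ih _ (by intro row hrow; simpa using h row (List.mem_cons_of_mem _ hrow))]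
    simp only [List.length_map, List.length_range]
    apply List.ext_getElem
    · simp
    · intro k hk1 hk2
      simp only [List.length_map, List.length_range] at hk1
      have hones : pvOnes (r :: t) (k : Int) =
          (if PySem.List.pyGetD r (k : Int) 0 ≠ 0 then (1:Int) else 0) + pvOnes t (k : Int) := by
        simp only [pvOnes_countP, List.countP_cons]
        by_cases hcase : PySem.List.pyGetD r (k : Int) 0 = 0
        · simp [hcase]
        · simp; ring
      have hget : PySem.List.pyGetD r (k : Int) 0 = r[k]?.getD 0 := by
        rw [PySem.List.pyGetD_natCast, List.getD_eq_getElem?_getD]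
      simp only [List.getElem_map, List.getElem_range, List.getD_eq_getElem?_getD,
        List.getElem?_map, List.getElem?_range (show k < cs.length from hk1), Option.map_some,
        Option.getD_some, hones, hget]
      ring

-- ===== VERDICT (by name: the statement is the Claim_ definition above) =====
theorem get_gamma_rate_spec : Claim_equal_get_gamma_rate := by
  intro bn _ hpre
  unfold Spec_get_gamma_rate get_gamma_rate get_gamma_rate_alt
  by_cases hn : bn.length = 0
  · simp [hn]
  · rw [if_neg hn, if_neg hn]
    -- the per-column counting loop of A computes the majority bit pvBit
    have hA : ∀ (acc : List Int) (j : Int),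
        (fun (acc : List Int) j =>
          let counts : Int × Int :=
            (PySem.List.pyRange 0 (bn.length : Int) 1).foldl
              (fun (p : Int × Int) i =>
                if PySem.List.pyGetD (PySem.List.pyGetD bn i []) j 0 = 0
                then (p.1, p.2 + 1) else (p.1 + 1, p.2))
              (0, 0)
          if counts.1 > counts.2 then acc ++ [1] else acc ++ [0]) acc j
        = acc ++ [pvBit bn j] := by
      intro acc j
      simp only
      rw [PySem.List.foldl_pyRange_zero_pyGetD' bn []
            (fun (p : Int × Int) row =>
              if PySem.List.pyGetD row j 0 = 0 then (p.1, p.2 + 1) else (p.1 + 1, p.2))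
            ((0 : Int), (0 : Int)),
          countPair_eq]
      unfold pvBit
      by_cases h : 2 * pvOnes bn j > (bn.length : Int)
      · rw [if_pos (by omega), if_pos h]
      · rw [if_neg (by omega), if_neg h]
    rw [PySem.List.foldl_congr_mem _ _ _ _ (fun acc j _ => hA acc j),
        PySem.List.foldl_append_singleton_eq_map (pvBit bn), List.nil_append,
        finalLoop_eq_horner, List.foldl_map]
    -- B's side: the count vector is the per-column ones counts, then Horner
    set m := (PySem.List.pyGetD bn 0 []).length with hm
    have hrows : ∀ row ∈ bn, (List.replicate m (0 : Int)).length ≤ row.length := by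
      intro row hrow
      have hhead : PySem.List.pyGetD bn 0 [] = bn.headD [] := by
        cases bn with
        | nil => simp at hn
        | cons x t => simp [PySem.List.pyGetD, PySem.List.pyIdx?, PySem.List.pyGet?]
      simpa [hm, hhead] using hpre row hrow
    rw [zipfold_eq bn (List.replicate m (0 : Int)) hrows, List.length_replicate,
        List.foldl_map]
    have hrange : PySem.List.pyRange 0 (m : Int) 1 = (List.range m).map Int.ofNat := by
      rw [PySem.List.pyRange_one]
      simp only [Int.sub_zero, Int.toNat_natCast, zero_add]
      rfl
    rw [hrange, List.foldl_map]
    apply PySem.List.foldl_congr_mem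
    intro acc k _
    have hrepl : (List.replicate m (0 : Int)).getD k 0 = 0 := by
      rw [List.getD_eq_getElem?_getD, List.getElem?_replicate]
      split_ifs <;> rfl
    rw [hrepl, zero_add]
    unfold pvBit
    rfl
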